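-- pv_equiv track=rewrite | github.com/royw/taskfile_help | src/taskfile_help/output.py | _group_tasks_by_group
-- ===== SOURCE A (Python) =====
-- def _group_tasks_by_group(
--
--     tasks: list[tuple[str, str, str]],
-- ) -> dict[str, list[tuple[str, str]]]:
--     """Group tasks by group name.
--
--     Args:
--         tasks: List of (group, task_name, description) tuples
--
--     Returns:
--         Dictionary mapping group names to lists of (task_name, description) tuples
--     """
--     grouped: dict[str, list[tuple[str, str]]] = {}
--     for group, task_name, desc in tasks:
--         if group not in grouped:
--             grouped[group] = []
--         grouped[group].append((task_name, desc))
--     return grouped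
-- ===== SOURCE B (Python) =====
-- def _group_tasks_by_group(
--     tasks: list[tuple[str, str, str]],
-- ) -> dict[str, list[tuple[str, str]]]:
--     """Group tasks by group name (two-pass comprehension version)."""
--     return {
--         g: [(name, desc) for (g2, name, desc) in tasks if g2 == g]
--         for g in dict.fromkeys(g for g, _, _ in tasks)
--     }
-- ===== Notes on version B (the rewrite author's own statement) =====
-- stated objective: idiomatic
-- what changed: Replaced the incremental if-not-in-dict accumulation loop by a two-pass dict comprehension: ordered key dedup via dict.fromkeys, then one filtering list comprehension per distinct group.
import Mathlib
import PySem

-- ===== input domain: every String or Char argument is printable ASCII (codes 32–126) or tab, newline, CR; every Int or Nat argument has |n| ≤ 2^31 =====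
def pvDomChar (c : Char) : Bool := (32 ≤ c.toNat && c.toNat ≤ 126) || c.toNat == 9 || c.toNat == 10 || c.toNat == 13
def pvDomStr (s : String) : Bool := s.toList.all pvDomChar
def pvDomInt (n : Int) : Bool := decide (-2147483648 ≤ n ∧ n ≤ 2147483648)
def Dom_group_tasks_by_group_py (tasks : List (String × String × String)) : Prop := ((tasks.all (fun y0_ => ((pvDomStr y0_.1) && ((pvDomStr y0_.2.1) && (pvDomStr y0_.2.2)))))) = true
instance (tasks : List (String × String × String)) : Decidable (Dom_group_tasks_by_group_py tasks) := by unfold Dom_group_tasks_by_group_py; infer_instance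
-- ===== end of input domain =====

-- B replaces A's incremental dict accumulation by a two-pass dict comprehension
-- (ordered key dedup, then a per-key filtering comprehension); objective: idiomatic.

-- ===== PORT A =====
-- the loop body: if group not in grouped: grouped[group] = []; grouped[group].append((task_name, desc))
def pvStepA (d : PySem.Dict String (List (String × String)))
    (t : String × String × String) : PySem.Dict String (List (String × String)) :=
  let d' := if d.contains t.1 then d else d.insert t.1 []
  d'.modify t.1 [] (fun l => l ++ [(t.2.1, t.2.2)])

def group_tasks_by_group_py (tasks : List (String × String × String)) :
    List (String × List (String × String)) :=
  (tasks.foldl pvStepA PySem.Dict.empty).items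

-- ===== PORT B =====
def group_tasks_by_group_py_alt (tasks : List (String × String × String)) :
    List (String × List (String × String)) :=
  (PySem.List.dedup (tasks.map (fun t => t.1))).map (fun g =>
    (g, tasks.filterMap (fun t => if t.1 == g then some (t.2.1, t.2.2) else none)))

-- ===== PRECONDITION & SPEC =====
def Spec_group_tasks_by_group_py (tasks : List (String × String × String)) (out : List (String × List (String × String))) : Prop := out = group_tasks_by_group_py_alt tasks
instance (tasks : List (String × String × String)) (out : List (String × List (String × String))) : Decidable (Spec_group_tasks_by_group_py tasks out) := by unfold Spec_group_tasks_by_group_py; infer_instance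

-- ===== CLAIM (what is proved, stated in full; the proofs are below) =====
def Claim_equal_group_tasks_by_group_py : Prop := ∀ (tasks : List (String × String × String)), Dom_group_tasks_by_group_py tasks → Spec_group_tasks_by_group_py tasks (group_tasks_by_group_py tasks)

-- ===== LEMMAS AND PROOFS =====

-- A's guarded step is extensionally one modify-with-default-[] step.
theorem pvStepA_eq_modify (d : PySem.Dict String (List (String × String)))
    (t : String × String × String) :
    pvStepA d t = d.modify t.1 [] (fun l => l ++ [(t.2.1, t.2.2)]) := by
  unfold pvStepA
  by_cases h : d.contains t.1 = true
  · simp [h]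
  · simp only [Bool.not_eq_true] at h
    simp [h, PySem.Dict.modify, PySem.Dict.getD_insert_self, PySem.Dict.insert_insert_self,
      PySem.Dict.getD_of_not_contains]

-- The fold over triples is the standard grouping fold over (key, value) pairs.
theorem pvFoldA_eq (tasks : List (String × String × String)) :
    tasks.foldl pvStepA PySem.Dict.empty
      = (tasks.map (fun t => (t.1, (t.2.1, t.2.2)))).foldl
          (fun d p => d.modify p.1 [] (fun l => l ++ [p.2])) PySem.Dict.empty := by
  rw [List.foldl_map]
  suffices h : ∀ (d : PySem.Dict String (List (String × String))),
      tasks.foldl pvStepA d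
        = tasks.foldl (fun d t => d.modify t.1 [] (fun l => l ++ [(t.2.1, t.2.2)])) d from h _
  induction tasks with
  | nil => intro _; rfl
  | cons t ts ih => intro d; simp only [List.foldl_cons, pvStepA_eq_modify, ih]

-- filter-then-project of the paired list is B's guarded filterMap.
theorem pvFilterMap_eq (tasks : List (String × String × String)) (g : String) :
    ((tasks.map (fun t => (t.1, (t.2.1, t.2.2)))).filter (fun p => p.1 == g)).map
        (fun p => p.2)
      = tasks.filterMap (fun t => if t.1 == g then some (t.2.1, t.2.2) else none) := by
  induction tasks with
  | nil => rfl
  | cons t ts ih =>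
    by_cases h : t.1 = g <;> simpa [h] using ih

-- ===== VERDICT (by name: the statement is the Claim_ definition above) =====
theorem group_tasks_by_group_py_spec : Claim_equal_group_tasks_by_group_py := by
  intro tasks _
  unfold Spec_group_tasks_by_group_py group_tasks_by_group_py group_tasks_by_group_py_alt
  rw [pvFoldA_eq]
  set l := tasks.map (fun t => (t.1, (t.2.1, t.2.2))) with hl
  set D := l.foldl (fun d p => d.modify p.1 [] (fun v => v ++ [p.2])) PySem.Dict.empty with hD
  have hnd : D.keys.Nodup := by
    rw [hD]
    exact PySem.Dict.nodup_keys_foldl_modify_key l (fun p => p.1) _ _ _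
      (by simp [PySem.Dict.keys_empty])
  have hkeys : D.keys = PySem.List.dedup (tasks.map (fun t => t.1)) := by
    rw [hD]
    rw [PySem.Dict.keys_foldl_modify_key]
    simp only [PySem.Dict.keys_empty, hl, List.map_map, pysem]
    simp [PySem.Set.ofList, List.foldl_map]
  rw [PySem.Dict.items_eq_map_keys D hnd [], hkeys]
  refine List.map_congr_left (fun g _ => ?_)
  have hget : D.getD g [] = ((l.filter (fun p => p.1 == g)).map (fun p => p.2)) := by
    rw [hD, PySem.Dict.getD_foldl_modify_append]
    simp [PySem.Dict.getD_empty]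
  rw [hget, hl, pvFilterMap_eq]
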